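-- pv_equiv track=rewrite | github.com/hkc6775/new.github.com | forms/function.py | traitementEmail
-- ===== SOURCE A (Python) =====
-- def traitementEmail(email):
--     tab = ["=", '/', '>', '<', '!', '%', '*', '+',
--            ")", "("]
--     i = 0
--     if email:
--         for i in tab:
--             if i in email:
--                 return False
--     return True
-- ===== SOURCE B (Python) =====
-- _DELETE = str.maketrans('', '', '=/><!%*+)(')
--
-- def traitementEmail(email):
--     if not email:
--         return True
--     return len(email.translate(_DELETE)) == len(email)
-- ===== Notes on version B (the rewrite author's own statement) =====
-- stated objective: alternative
-- what changed: Instead of scanning the email once per forbidden character, B deletes all forbidden characters in one str.translate pass and reports whether the length is unchanged.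
import Mathlib
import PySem

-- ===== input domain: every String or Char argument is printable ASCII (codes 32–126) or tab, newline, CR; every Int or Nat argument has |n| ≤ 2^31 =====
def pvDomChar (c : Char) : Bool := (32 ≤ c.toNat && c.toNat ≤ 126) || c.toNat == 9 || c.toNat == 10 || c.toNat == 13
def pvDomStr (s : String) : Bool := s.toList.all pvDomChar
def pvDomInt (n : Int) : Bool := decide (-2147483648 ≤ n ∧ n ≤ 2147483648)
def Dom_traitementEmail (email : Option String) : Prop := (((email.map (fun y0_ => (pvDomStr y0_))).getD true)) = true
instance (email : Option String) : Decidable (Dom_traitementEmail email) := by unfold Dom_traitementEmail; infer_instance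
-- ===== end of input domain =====

-- B deletes the forbidden characters in one pass (Python str.translate) and checks the length is unchanged, instead of A's scan of the email once per forbidden character.

-- ===== PORT A =====
-- the 'for i in tab: if i in email: return False' loop, as structural recursion over tab
def pvALoop (email : String) : List String → Bool
  | [] => true
  | t :: ts => if PySem.Str.isIn t email then false else pvALoop email ts

def traitementEmail (email : Option String) : Bool :=
  match email with
  | none => true
  | some e =>
    if e = "" then true
    else pvALoop e ["=", "/", ">", "<", "!", "%", "*", "+", ")", "("]

-- ===== PORT B =====
def pvDeleted : List Char := "=/><!%*+)(".toList

-- email.translate(table deleting pvDeleted): keep exactly the chars not in pvDeleted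
def pvTranslateDel (e : String) : List Char :=
  e.toList.filter (fun c => !(pvDeleted.contains c))

def traitementEmail_alt (email : Option String) : Bool :=
  match email with
  | none => true
  | some e =>
    if e = "" then true
    else (pvTranslateDel e).length == e.toList.length

-- ===== PRECONDITION & SPEC =====
def Spec_traitementEmail (email : Option String) (out : Bool) : Prop := out = traitementEmail_alt email
instance (email : Option String) (out : Bool) : Decidable (Spec_traitementEmail email out) := by unfold Spec_traitementEmail; infer_instance

-- ===== CLAIM (what is proved, stated in full; the proofs are below) =====
def Claim_equal_traitementEmail : Prop := ∀ (email : Option String), Dom_traitementEmail email → Spec_traitementEmail email (traitementEmail email)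

-- ===== LEMMAS AND PROOFS =====

def pvForbidden : List Char := ['=', '/', '>', '<', '!', '%', '*', '+', ')', '(']

-- single-character membership: a one-char string is in e iff its char is in e.toList
theorem pvIsIn_singleton (t : String) (c : Char) (e : String) (ht : t.toList = [c]) :
    PySem.Str.isIn t e = e.toList.contains c := by
  by_cases h : c ∈ e.toList
  · have hinf : [c] <:+: e.toList := by
      obtain ⟨pre, suf, hps⟩ := List.append_of_mem h
      exact ⟨pre, suf, by simp [hps]⟩
    simp [ht, (PySem.Chars.isIn_iff_infix [c] e.toList).2 hinf, h]
  · have hninf : ¬ ([c] <:+: e.toList) := fun hi => h (hi.subset (by simp))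
    simp [ht, (PySem.Chars.isIn_eq_false_iff [c] e.toList).2 hninf, h]

set_option maxHeartbeats 1000000 in
theorem pvALoop_eq (e : String) :
    pvALoop e ["=", "/", ">", "<", "!", "%", "*", "+", ")", "("]
      = !(pvForbidden.any (fun c => e.toList.contains c)) := by
  simp only [pvALoop, pvForbidden]
  rw [pvIsIn_singleton "=" '=' e (by decide),
      pvIsIn_singleton "/" '/' e (by decide),
      pvIsIn_singleton ">" '>' e (by decide),
      pvIsIn_singleton "<" '<' e (by decide),
      pvIsIn_singleton "!" '!' e (by decide),
      pvIsIn_singleton "%" '%' e (by decide),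
      pvIsIn_singleton "*" '*' e (by decide),
      pvIsIn_singleton "+" '+' e (by decide),
      pvIsIn_singleton ")" ')' e (by decide),
      pvIsIn_singleton "(" '(' e (by decide)]
  simp only [List.any_cons, List.any_nil]
  by_cases h1 : e.toList.contains '=' <;>
  by_cases h2 : e.toList.contains '/' <;>
  by_cases h3 : e.toList.contains '>' <;>
  by_cases h4 : e.toList.contains '<' <;>
  by_cases h5 : e.toList.contains '!' <;>
  by_cases h6 : e.toList.contains '%' <;>
  by_cases h7 : e.toList.contains '*' <;>
  by_cases h8 : e.toList.contains '+' <;>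
  by_cases h9 : e.toList.contains ')' <;>
  by_cases h10 : e.toList.contains '(' <;>
  simp [h1, h2, h3, h4, h5, h6, h7, h8, h9, h10]

theorem pvDeleted_eq : pvDeleted = pvForbidden := by decide

theorem pvFilterLen_eq (e : String) :
    ((pvTranslateDel e).length == e.toList.length)
      = !(pvForbidden.any (fun c => e.toList.contains c)) := by
  unfold pvTranslateDel
  rw [pvDeleted_eq]
  rcases hA : pvForbidden.any (fun c => e.toList.contains c) with _ | _
  · -- no forbidden char in e: nothing is filtered out
    rw [Bool.not_false, beq_iff_eq]
    simp only [List.any_eq_false] at hA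
    rw [List.filter_eq_self.2]
    intro c hc
    simp only [Bool.not_eq_eq_eq_not, Bool.not_true, List.contains_eq_mem,
      decide_eq_false_iff_not]
    intro hcf
    exact absurd (by simpa using hc) (by simpa using hA c hcf)
  · -- some forbidden char in e: the filtered list is strictly shorter
    rw [Bool.not_true, beq_eq_false_iff_ne]
    simp only [List.any_eq_true] at hA
    obtain ⟨c, hcf, hce⟩ := hA
    intro hlen
    have hall := List.length_filter_eq_length_iff.1 hlen
    have := hall c (by simpa using hce)
    simp only [Bool.not_eq_eq_eq_not, Bool.not_true, List.contains_eq_mem,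
      decide_eq_false_iff_not] at this
    exact this hcf

-- ===== VERDICT (by name: the statement is the Claim_ definition above) =====
theorem traitementEmail_spec : Claim_equal_traitementEmail := by
  intro email _
  unfold Spec_traitementEmail traitementEmail traitementEmail_alt
  match email with
  | none => rfl
  | some e =>
    by_cases he : e = ""
    · simp [he]
    · simp only [he, if_false]
      rw [pvALoop_eq, pvFilterLen_eq]
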